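-- pv_equiv track=rewrite | github.com/ChaseHampton/DCDBE | DCDBE/spiders/DCDBESpider.py | parse_address
-- ===== SOURCE A (Python) =====
-- def parse_address(address_full: list):
--     address1 = address_full[0].strip()
--     address2 = address_full[1].strip()
--     phone = [v.replace("Phone: ", "") for v in address_full if 'Phone:' in v]
--     fax = [v.replace("Fax: ", "") for v in address_full if 'Fax:' in v]
--     email = [v.replace("Email: ", "") for v in address_full if 'Email:' in v]
--     website = [v.replace("Website: ", "") for v in address_full if 'Website:' in v]
--     return address1, address2, phone, fax, email, website
-- ===== SOURCE B (Python) =====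
-- TAGS = ("Phone", "Fax", "Email", "Website")
--
-- def parse_address(address_full: list):
--     # Stage 1: flatten to a list of (tag, cleaned value) pairs.
--     pairs = [(t, v.replace(t + ": ", ""))
--              for v in address_full for t in TAGS if t + ":" in v]
--     # Stage 2: group the pairs by tag into a dictionary of lists.
--     groups = {}
--     for t, cleaned in pairs:
--         groups.setdefault(t, []).append(cleaned)
--     return (address_full[0].strip(), address_full[1].strip(),
--             groups.get("Phone", []), groups.get("Fax", []),
--             groups.get("Email", []), groups.get("Website", []))
-- ===== Notes on version B (the rewrite author's own statement) =====
-- stated objective: alternative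
-- what changed: Replaces the four independent filter-comprehensions by a two-stage tag-and-group pipeline: one pass flattens the input into a list of (tag, cleaned value) pairs over a data-driven tag table, and a second pass groups those pairs by tag into a dictionary of lists.
import Mathlib
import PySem

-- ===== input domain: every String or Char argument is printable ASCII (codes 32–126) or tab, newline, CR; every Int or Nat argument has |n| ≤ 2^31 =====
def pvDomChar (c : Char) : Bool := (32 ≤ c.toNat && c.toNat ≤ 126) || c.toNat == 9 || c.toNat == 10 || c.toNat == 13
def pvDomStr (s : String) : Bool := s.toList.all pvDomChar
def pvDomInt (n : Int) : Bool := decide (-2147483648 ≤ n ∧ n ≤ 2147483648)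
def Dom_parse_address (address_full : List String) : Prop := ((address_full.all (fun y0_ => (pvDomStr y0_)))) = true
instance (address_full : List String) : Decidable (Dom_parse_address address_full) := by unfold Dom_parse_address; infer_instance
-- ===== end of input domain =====

-- B replaces A's four filter-comprehensions by a two-stage tag-and-group pipeline:
-- flatten to (tag, cleaned value) pairs over a tag table, then group by tag into a dict.

-- ===== PORT A =====
def parse_address (address_full : List String) : String × String × List String × List String × List String × List String :=
  let address1 := PySem.Str.strip (PySem.List.pyGetD address_full 0 "")
  let address2 := PySem.Str.strip (PySem.List.pyGetD address_full 1 "")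
  let phone := (address_full.filter (fun v => PySem.Str.isIn "Phone:" v)).map
      (fun v => PySem.Str.replace v "Phone: " "")
  let fax := (address_full.filter (fun v => PySem.Str.isIn "Fax:" v)).map
      (fun v => PySem.Str.replace v "Fax: " "")
  let email := (address_full.filter (fun v => PySem.Str.isIn "Email:" v)).map
      (fun v => PySem.Str.replace v "Email: " "")
  let website := (address_full.filter (fun v => PySem.Str.isIn "Website:" v)).map
      (fun v => PySem.Str.replace v "Website: " "")
  (address1, address2, phone, fax, email, website)

-- ===== PORT B =====
-- the tag table (module constant TAGS in Source B)
def pbTags : List String := ["Phone", "Fax", "Email", "Website"]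

def parse_address_alt (address_full : List String) : String × String × List String × List String × List String × List String :=
  -- Stage 1: flatten to a list of (tag, cleaned value) pairs
  let pairs := address_full.flatMap (fun v =>
    (pbTags.filter (fun t => PySem.Str.isIn (t ++ ":") v)).map
      (fun t => (t, PySem.Str.replace v (t ++ ": ") "")))
  -- Stage 2: group the pairs by tag into a dict of lists
  let groups := pairs.foldl (fun d p => d.modify p.1 [] (· ++ [p.2]))
      (PySem.Dict.empty : PySem.Dict String (List String))
  (PySem.Str.strip (PySem.List.pyGetD address_full 0 ""),
   PySem.Str.strip (PySem.List.pyGetD address_full 1 ""),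
   groups.getD "Phone" [], groups.getD "Fax" [],
   groups.getD "Email" [], groups.getD "Website" [])

-- ===== PRECONDITION & SPEC =====
-- Pre_ excludes lists of fewer than 2 elements, on which Python A raises IndexError at address_full[0] or [1].
def Pre_parse_address (address_full : List String) : Prop := 2 ≤ address_full.length
instance (address_full : List String) : Decidable (Pre_parse_address address_full) := by unfold Pre_parse_address; infer_instance
def pvWitness_parse_address : List String := ["1 Main St ", " Suite 2"]
def Spec_parse_address (address_full : List String) (out : String × String × List String × List String × List String × List String) : Prop := out = parse_address_alt address_full
instance (address_full : List String) (out : String × String × List String × List String × List String × List String) : Decidable (Spec_parse_address address_full out) := by unfold Spec_parse_address; infer_instance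

-- ===== CLAIM =====
def Claim_equal_parse_address : Prop := ∀ (address_full : List String), Dom_parse_address address_full → Pre_parse_address address_full → Spec_parse_address address_full (parse_address address_full)

-- ===== LEMMAS AND PROOFS =====

-- one element's contribution to the pairs list, restricted to a fixed tag t₀ ∈ pbTags
theorem pbContrib_filter (v : String) (t₀ : String) (ht : t₀ ∈ pbTags) :
    (((pbTags.filter (fun t => PySem.Str.isIn (t ++ ":") v)).map
        (fun t => (t, PySem.Str.replace v (t ++ ": ") ""))).filter
      (fun p => p.1 == t₀)).map (·.2)
    = if PySem.Str.isIn (t₀ ++ ":") v then [PySem.Str.replace v (t₀ ++ ": ") ""] else [] := by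
  simp only [pbTags, List.mem_cons, List.not_mem_nil, or_false] at ht
  rcases ht with h | h | h | h <;> subst h <;>
    simp only [pbTags, List.filter_cons, List.filter_nil] <;>
    split_ifs <;> simp_all

-- the grouped list for a fixed tag is exactly A's filter/map for that tag
theorem pbPairs_filter (af : List String) (t₀ : String) (ht : t₀ ∈ pbTags) :
    ((af.flatMap (fun v =>
        (pbTags.filter (fun t => PySem.Str.isIn (t ++ ":") v)).map
          (fun t => (t, PySem.Str.replace v (t ++ ": ") "")))).filter
      (fun p => p.1 == t₀)).map (·.2)
    = (af.filter (fun v => PySem.Str.isIn (t₀ ++ ":") v)).map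
        (fun v => PySem.Str.replace v (t₀ ++ ": ") "") := by
  induction af with
  | nil => simp
  | cons v af ih =>
    simp only [List.flatMap_cons, List.filter_append, List.map_append, ih,
      pbContrib_filter v t₀ ht, List.filter_cons]
    split_ifs <;> simp

-- ===== VERDICT =====
theorem parse_address_spec : Claim_equal_parse_address := by
  intro af _ _
  unfold Spec_parse_address parse_address parse_address_alt
  simp only [PySem.Dict.getD_foldl_modify_append, PySem.Dict.getD_empty, List.nil_append,
    pbPairs_filter af "Phone" (by simp [pbTags]),
    pbPairs_filter af "Fax" (by simp [pbTags]),
    pbPairs_filter af "Email" (by simp [pbTags]),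
    pbPairs_filter af "Website" (by simp [pbTags])]
  rfl
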